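-- pv_equiv track=rewrite | github.com/woodstock1993/CodingTest | test.py | solution
-- ===== SOURCE A (Python) =====
-- def solution(brown, yellow):
--     width = brown + yellow
--     divisor = []
--     for i in range(1, width + 1):
--         if width % i == 0:
--             divisor.append(i)
--
--     num = len(divisor)
--
--     if num % 2 == 1:
--         return sorted([divisor[num // 2], divisor[num // 2]], reverse=True)
--     else:
--         return sorted([divisor[num // 2 - 1], divisor[num // 2]], reverse=True)
-- ===== SOURCE B (Python) =====
-- def solution(brown, yellow):
--     width = brown + yellow
--     s = l = 0
--     i = 1
--     while i * i <= width:
--         if width % i == 0: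
--             s, l = i, width // i
--         i += 1
--     return [s, s] if s == l else [l, s]
-- ===== Notes on version B (the rewrite author's own statement) =====
-- stated objective: faster
-- what changed: Instead of collecting all divisors of width=brown+yellow by scanning 1..width and indexing the middle pair, B scans only 1..sqrt(width) keeping the last small divisor s and its cofactor width//s, which are exactly the middle divisor pair.
import Mathlib
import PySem

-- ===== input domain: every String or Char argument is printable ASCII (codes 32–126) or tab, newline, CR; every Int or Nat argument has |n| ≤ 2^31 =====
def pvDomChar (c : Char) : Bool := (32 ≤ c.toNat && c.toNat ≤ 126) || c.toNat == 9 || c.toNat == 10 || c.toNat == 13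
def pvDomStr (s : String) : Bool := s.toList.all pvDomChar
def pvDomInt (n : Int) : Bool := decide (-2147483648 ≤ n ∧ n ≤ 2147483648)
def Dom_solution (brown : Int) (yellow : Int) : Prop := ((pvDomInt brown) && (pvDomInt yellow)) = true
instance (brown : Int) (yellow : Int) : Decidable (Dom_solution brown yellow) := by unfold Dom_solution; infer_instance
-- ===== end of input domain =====

-- B replaces A's O(width) scan over all of 1..width by an O(sqrt(width)) scan keeping
-- the last small divisor and its cofactor, which form exactly the middle divisor pair.

-- ===== PORT A =====
def solution (brown : Int) (yellow : Int) : List Int :=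
  let width := brown + yellow
  let divisor := (PySem.List.pyRange 1 (width + 1) 1).foldl
      (fun acc i => if PySem.Int.mod width i == 0 then acc ++ [i] else acc) []
  let num : Int := divisor.length
  if PySem.Int.mod num 2 == 1 then
    PySem.List.sorted [PySem.List.pyGetD divisor (PySem.Int.floordiv num 2) 0,
                       PySem.List.pyGetD divisor (PySem.Int.floordiv num 2) 0] (fun x => x) true
  else
    PySem.List.sorted [PySem.List.pyGetD divisor (PySem.Int.floordiv num 2 - 1) 0,
                       PySem.List.pyGetD divisor (PySem.Int.floordiv num 2) 0] (fun x => x) true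

-- ===== PORT B =====
-- the while loop of Source B: state (s, l), i increasing while i*i ≤ width
def solutionLoop (width : Int) (i : Int) (s : Int) (l : Int) : Int × Int :=
  if h : i * i ≤ width then
    if PySem.Int.mod width i == 0 then
      solutionLoop width (i + 1) i (PySem.Int.floordiv width i)
    else
      solutionLoop width (i + 1) s l
  else
    (s, l)
termination_by (width + 1 - i).toNat
decreasing_by
  all_goals
    have hi : i ≤ width := by nlinarith [sq_nonneg i, sq_nonneg (i - 1)]
    omega

def solution_alt (brown : Int) (yellow : Int) : List Int :=
  let width := brown + yellow
  let sl := solutionLoop width 1 0 0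
  if sl.1 == sl.2 then [sl.1, sl.1] else [sl.2, sl.1]

-- ===== PRECONDITION & SPEC =====
-- Pre_ excludes width = brown + yellow ≤ 0, where A's divisor list is empty and
-- divisor[num//2 - 1] raises IndexError.
def Pre_solution (brown : Int) (yellow : Int) : Prop := 1 ≤ brown + yellow
instance (brown : Int) (yellow : Int) : Decidable (Pre_solution brown yellow) := by
  unfold Pre_solution; infer_instance

def pvWitness_solution : Int × Int := (8, 2)

def Spec_solution (brown : Int) (yellow : Int) (out : List Int) : Prop := out = solution_alt brown yellow
instance (brown : Int) (yellow : Int) (out : List Int) : Decidable (Spec_solution brown yellow out) := by unfold Spec_solution; infer_instance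

-- ===== CLAIM (what is proved, stated in full; the proofs are below) =====
def Claim_equal_solution : Prop := ∀ (brown : Int) (yellow : Int), Dom_solution brown yellow → Pre_solution brown yellow → Spec_solution brown yellow (solution brown yellow)

-- ===== LEMMAS AND PROOFS =====

-- divisor list
def pvDiv (w : Int) : List Int :=
  (PySem.List.pyRange 1 (w + 1) 1).filter (fun i => PySem.Int.mod w i == 0)

theorem pvDiv_pairwise (w : Int) : (pvDiv w).Pairwise (· < ·) :=
  List.Pairwise.filter _ (PySem.List.pairwise_lt_pyRange_one 1 (w + 1))

theorem mem_pvDiv {w x : Int} (hw : 1 ≤ w) : x ∈ pvDiv w ↔ 1 ≤ x ∧ x ∣ w := by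
  simp only [pvDiv, List.mem_filter, PySem.List.mem_pyRange_one, beq_iff_eq,
    PySem.Int.mod_eq_zero_iff_dvd]
  constructor
  · rintro ⟨⟨h1, _⟩, h3⟩; exact ⟨h1, h3⟩
  · rintro ⟨h1, h3⟩
    exact ⟨⟨h1, by have := Int.le_of_dvd (by omega) h3; omega⟩, h3⟩

theorem pv_cof_mul {w x : Int} (hx : x ∣ w) : x * (w / x) = w :=
  Int.mul_ediv_cancel' hx

theorem pv_cof_pos {w x : Int} (hw : 1 ≤ w) (hx : x ∣ w) (h1 : 1 ≤ x) : 1 ≤ w / x := by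
  have h := pv_cof_mul hx; nlinarith

theorem pv_cof_dvd {w x : Int} (hx : x ∣ w) : w / x ∣ w :=
  ⟨x, by rw [mul_comm]; exact (pv_cof_mul hx).symm⟩

theorem pv_cof_cof {w x : Int} (hw : 1 ≤ w) (hx : x ∣ w) (h1 : 1 ≤ x) : w / (w / x) = x := by
  have h := pv_cof_mul hx
  have h2 : w / x ∣ w := pv_cof_dvd hx
  have h3 := pv_cof_mul h2
  have h4 : 1 ≤ w / x := pv_cof_pos hw hx h1
  nlinarith

theorem pv_cof_anti {w a b : Int} (hw : 1 ≤ w) (ha : a ∣ w) (h1 : 1 ≤ a)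
    (hb : b ∣ w) (h2 : 1 ≤ b) (hab : a < b) : w / b < w / a := by
  have g1 := pv_cof_mul ha
  have g2 := pv_cof_mul hb
  have g3 := pv_cof_pos hw ha h1
  have g4 := pv_cof_pos hw hb h2
  nlinarith

theorem pv_sq_iff {w x : Int} (hw : 1 ≤ w) (hx : x ∣ w) (h1 : 1 ≤ x) :
    x * x ≤ w ↔ x ≤ w / x := by
  have g1 := pv_cof_mul hx
  have g2 := pv_cof_pos hw hx h1
  constructor <;> intro h <;> nlinarith

theorem pvDiv_map_rev {w : Int} (hw : 1 ≤ w) :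
    (pvDiv w).map (fun d => w / d) = (pvDiv w).reverse := by
  have hpw := pvDiv_pairwise w
  have hmemgt : (pvDiv w).Pairwise (fun a b => a ∈ pvDiv w ∧ b ∈ pvDiv w ∧ a < b) :=
    List.Pairwise.and_mem.mp hpw
  have hmap : ((pvDiv w).map (fun d => w / d)).Pairwise (· > ·) := by
    rw [List.pairwise_map]
    refine hmemgt.imp ?_
    rintro a b ⟨haL, hbL, hab⟩
    obtain ⟨ha1, hadvd⟩ := (mem_pvDiv hw).mp haL
    obtain ⟨hb1, hbdvd⟩ := (mem_pvDiv hw).mp hbL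
    exact pv_cof_anti hw hadvd ha1 hbdvd hb1 hab
  have hrev : ((pvDiv w).reverse).Pairwise (· > ·) := by
    rw [List.pairwise_reverse]; exact hpw
  refine List.Perm.eq_of_pairwise ?_ hmap hrev ?_
  · intro a b _ _ h1 h2; omega
  · refine (List.perm_ext_iff_of_nodup (List.Pairwise.nodup hmap) ?_).mpr ?_
    · exact List.Pairwise.nodup hrev
    · intro x
      simp only [List.mem_map, List.mem_reverse]
      constructor
      · rintro ⟨d, hd, rfl⟩
        obtain ⟨h1, hdvd⟩ := (mem_pvDiv hw).mp hd
        exact (mem_pvDiv hw).mpr ⟨pv_cof_pos hw hdvd h1, pv_cof_dvd hdvd⟩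
      · intro hx
        obtain ⟨h1, hdvd⟩ := (mem_pvDiv hw).mp hx
        refine ⟨w / x, (mem_pvDiv hw).mpr ⟨pv_cof_pos hw hdvd h1, pv_cof_dvd hdvd⟩, ?_⟩
        exact pv_cof_cof hw hdvd h1

theorem pv_filter_eq_take {α : Type} (l : List α) (p : α → Bool) (k : Nat)
    (h : ∀ j (hj : j < l.length), (p l[j] = true ↔ j < k)) : l.filter p = l.take k := by
  induction l generalizing k with
  | nil => simp
  | cons a t ih =>
    have h0 := h 0 (by simp)
    cases k with
    | zero =>
      have hpa : p a = false := by
        rcases Bool.eq_false_or_eq_true (p a) with ht | hf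
        · exact absurd (h0.mp (by simpa using ht)) (by omega)
        · exact hf
      have ht0 : t.filter p = t.take 0 := ih 0 (fun j hj => by
        simpa using h (j + 1) (by simpa using Nat.succ_lt_succ hj))
      simp [hpa, ht0]
    | succ m =>
      have hpa : p a = true := h0.mpr (by omega)
      have htm : t.filter p = t.take m := ih m (fun j hj => by
        have h2 := h (j + 1) (by simpa using Nat.succ_lt_succ hj)
        simp only [List.getElem_cons_succ] at h2
        rw [h2]
        omega)
      have hc : List.filter p (a :: t) = a :: List.filter p t := by
        simp [hpa]
      rw [hc, htm, List.take_succ_cons]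

theorem pvDiv_getElem_lt {w : Int} {i j : Nat} (hij : i < j) (hj : j < (pvDiv w).length) :
    (pvDiv w)[i]'(by omega) < (pvDiv w)[j] :=
  List.pairwise_iff_getElem.mp (pvDiv_pairwise w) i j (by omega) hj hij

theorem pvDiv_getElem_cof {w : Int} (hw : 1 ≤ w) {j : Nat} (hj : j < (pvDiv w).length) :
    w / (pvDiv w)[j] = (pvDiv w)[(pvDiv w).length - 1 - j]'(by omega) := by
  have h := pvDiv_map_rev hw
  have h2 : ((pvDiv w).map (fun d => w / d))[j]'(by simpa using hj) =
      ((pvDiv w).reverse)[j]'(by simpa using hj) := List.getElem_of_eq h (by simpa using hj)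
  simpa [List.getElem_map, List.getElem_reverse] using h2

theorem pvDiv_sq_index {w : Int} (hw : 1 ≤ w) {j : Nat} (hj : j < (pvDiv w).length) :
    ((pvDiv w)[j] * (pvDiv w)[j] ≤ w ↔ j < ((pvDiv w).length - 1) / 2 + 1) := by
  obtain ⟨h1, hdvd⟩ := (mem_pvDiv hw).mp ((pvDiv w).getElem_mem hj)
  rw [pv_sq_iff hw hdvd h1, pvDiv_getElem_cof hw hj]
  constructor
  · intro hle
    by_contra hcon
    have hlt : (pvDiv w).length - 1 - j < j := by omega
    exact absurd hle (not_le.mpr (pvDiv_getElem_lt hlt hj))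
  · intro hlt
    rcases Nat.lt_or_ge j ((pvDiv w).length - 1 - j) with hc | hc
    · exact le_of_lt (pvDiv_getElem_lt hc (by omega))
    · have he : (pvDiv w)[(pvDiv w).length - 1 - j]'(by omega) = (pvDiv w)[j] := by
        congr 1
        omega
      exact le_of_eq he.symm


theorem solutionLoop_eq (w : Int) (i s l : Int) (hi : 1 ≤ i) :
    solutionLoop w i s l =
      (match ((PySem.List.pyRange i (w + 1) 1).filter
          (fun d => decide (d * d ≤ w) && (PySem.Int.mod w d == 0))).getLast? with
      | none => (s, l)
      | some d => (d, PySem.Int.floordiv w d)) := by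
  fun_induction solutionLoop w i s l with
  | case1 i s l h hmod ih =>
    have hiw : i < w + 1 := by nlinarith
    rw [PySem.List.pyRange_one_cons hiw]
    have hd : (decide (i * i ≤ w) && (PySem.Int.mod w i == 0)) = true := by
      simp [h, hmod]
    simp only [List.filter_cons, hd, if_true]
    rw [List.getLast?_cons, ih (by omega)]
    cases hK : ((PySem.List.pyRange (i + 1) (w + 1)).filter
        (fun d => decide (d * d ≤ w) && (PySem.Int.mod w d == 0))).getLast? with
    | none => simp
    | some d => simp
  | case2 i s l h hmod ih =>
    have hiw : i < w + 1 := by nlinarith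
    rw [PySem.List.pyRange_one_cons hiw]
    have hd : (decide (i * i ≤ w) && (PySem.Int.mod w i == 0)) = false := by
      simp [h, hmod]
    simp only [List.filter_cons, hd, Bool.false_eq_true, if_false]
    rw [ih (by omega)]
  | case3 i s l h =>
    have hnil : ((PySem.List.pyRange i (w + 1) 1).filter
        (fun d => decide (d * d ≤ w) && (PySem.Int.mod w d == 0))) = [] := by
      refine List.filter_eq_nil_iff.mpr ?_
      intro d hd
      obtain ⟨hd1, hd2⟩ := PySem.List.mem_pyRange_one.mp hd
      have : ¬ d * d ≤ w := by nlinarith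
      simp [this]
    rw [hnil]
    simp

theorem pvDiv_ne_nil {w : Int} (hw : 1 ≤ w) : pvDiv w ≠ [] :=
  List.ne_nil_of_mem ((mem_pvDiv hw).mpr ⟨le_refl 1, one_dvd w⟩)

theorem pvS_eq_take {w : Int} (hw : 1 ≤ w) :
    (pvDiv w).filter (fun d => decide (d * d ≤ w)) =
      (pvDiv w).take (((pvDiv w).length - 1) / 2 + 1) := by
  refine pv_filter_eq_take _ _ _ ?_
  intro j hj
  simpa [decide_eq_true_iff] using pvDiv_sq_index hw hj

theorem pvS_getLast {w : Int} (hw : 1 ≤ w) :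
    ((pvDiv w).filter (fun d => decide (d * d ≤ w))).getLast? =
      some ((pvDiv w)[((pvDiv w).length - 1) / 2]'
        (by have := List.length_pos_of_ne_nil (pvDiv_ne_nil hw); omega)) := by
  have hn : 1 ≤ (pvDiv w).length := List.length_pos_of_ne_nil (pvDiv_ne_nil hw)
  rw [pvS_eq_take hw, List.getLast?_eq_getElem?]
  have hlen : ((pvDiv w).take (((pvDiv w).length - 1) / 2 + 1)).length
      = ((pvDiv w).length - 1) / 2 + 1 := by
    simp [List.length_take]; omega
  rw [hlen]
  simp only [Nat.add_sub_cancel]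
  rw [List.getElem?_take_of_lt (by omega)]
  rw [List.getElem?_eq_getElem (by omega)]
theorem pv_getElem_congr {L : List Int} {i j : Nat} (hij : i = j) (hi : i < L.length) :
    L[i] = L[j]'(hij ▸ hi) := by subst hij; rfl

theorem pv_core {w : Int} (hw : 1 ≤ w) :
    (if PySem.Int.mod ((pvDiv w).length : Int) 2 == 1 then
       PySem.List.sorted [PySem.List.pyGetD (pvDiv w) (PySem.Int.floordiv ((pvDiv w).length : Int) 2) 0,
                          PySem.List.pyGetD (pvDiv w) (PySem.Int.floordiv ((pvDiv w).length : Int) 2) 0] (fun x => x) true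
     else
       PySem.List.sorted [PySem.List.pyGetD (pvDiv w) (PySem.Int.floordiv ((pvDiv w).length : Int) 2 - 1) 0,
                          PySem.List.pyGetD (pvDiv w) (PySem.Int.floordiv ((pvDiv w).length : Int) 2) 0] (fun x => x) true)
    = (if (solutionLoop w 1 0 0).1 == (solutionLoop w 1 0 0).2
        then [(solutionLoop w 1 0 0).1, (solutionLoop w 1 0 0).1]
        else [(solutionLoop w 1 0 0).2, (solutionLoop w 1 0 0).1]) := by
  have hn1 : 1 ≤ (pvDiv w).length := List.length_pos_of_ne_nil (pvDiv_ne_nil hw)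
  have hm : ((pvDiv w).length - 1) / 2 < (pvDiv w).length := by omega
  -- the B-side loop returns the middle small divisor and its cofactor
  have hB : solutionLoop w 1 0 0 =
      ((pvDiv w)[((pvDiv w).length - 1) / 2],
       (pvDiv w)[(pvDiv w).length - 1 - ((pvDiv w).length - 1) / 2]'(by omega)) := by
    rw [solutionLoop_eq w 1 0 0 (le_refl 1)]
    have hff : (PySem.List.pyRange 1 (w + 1) 1).filter
          (fun d => decide (d * d ≤ w) && (PySem.Int.mod w d == 0)) =
        (pvDiv w).filter (fun d => decide (d * d ≤ w)) := by
      rw [pvDiv, List.filter_filter]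
    rw [hff, pvS_getLast hw]
    have hpos : (1:Int) ≤ (pvDiv w)[((pvDiv w).length - 1) / 2]'hm :=
      ((mem_pvDiv hw).mp ((pvDiv w).getElem_mem hm)).1
    have hfd : PySem.Int.floordiv w ((pvDiv w)[((pvDiv w).length - 1) / 2]'hm) =
        w / (pvDiv w)[((pvDiv w).length - 1) / 2]'hm :=
      PySem.Int.floordiv_eq_ediv_of_pos (by omega)
    simp only [hfd, pvDiv_getElem_cof hw hm]
  rw [hB]
  have hmod2 : PySem.Int.mod ((pvDiv w).length : Int) 2 = (((pvDiv w).length % 2 : Nat) : Int) := by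
    exact_mod_cast PySem.Int.mod_natCast (pvDiv w).length 2
  have hfd2 : PySem.Int.floordiv ((pvDiv w).length : Int) 2 = (((pvDiv w).length / 2 : Nat) : Int) := by
    exact_mod_cast PySem.Int.floordiv_natCast (pvDiv w).length 2
  have hget : PySem.List.pyGetD (pvDiv w) (PySem.Int.floordiv ((pvDiv w).length : Int) 2) 0 =
      (pvDiv w)[(pvDiv w).length / 2]'(by omega) := by
    rw [hfd2, PySem.List.pyGetD_natCast, List.getD_eq_getElem _ _ (by omega)]
  by_cases hpar : (pvDiv w).length % 2 = 1
  · -- odd number of divisors: w is a square, both entries are the middle divisor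
    have hxy : (pvDiv w)[((pvDiv w).length - 1) / 2]'hm =
        (pvDiv w)[(pvDiv w).length - 1 - ((pvDiv w).length - 1) / 2]'(by omega) :=
      pv_getElem_congr (by omega) hm
    rw [if_pos (by simp only [hmod2, beq_iff_eq]; omega), if_pos (by simp [← hxy])]
    rw [hget, PySem.List.sorted_rev_eq_self_of_pairwise _ _ (by simp)]
    have h2 : (pvDiv w)[(pvDiv w).length / 2]'(by omega) =
        (pvDiv w)[((pvDiv w).length - 1) / 2]'hm := pv_getElem_congr (by omega) (by omega)
    simp [h2]
  · -- even number of divisors: the two middle divisors, larger first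
    have hn2 : 2 ≤ (pvDiv w).length := by omega
    have hlt : (pvDiv w)[((pvDiv w).length - 1) / 2]'hm <
        (pvDiv w)[(pvDiv w).length - 1 - ((pvDiv w).length - 1) / 2]'(by omega) :=
      pvDiv_getElem_lt (by omega) (by omega)
    rw [if_neg (by simp only [hmod2, beq_iff_eq]; omega), if_neg (by simp; exact hlt.ne)]
    have hget2 : PySem.List.pyGetD (pvDiv w) (PySem.Int.floordiv ((pvDiv w).length : Int) 2 - 1) 0 =
        (pvDiv w)[(pvDiv w).length / 2 - 1]'(by omega) := by
      have hc : PySem.Int.floordiv ((pvDiv w).length : Int) 2 - 1 =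
          (((pvDiv w).length / 2 - 1 : Nat) : Int) := by
        rw [hfd2]
        have : 1 ≤ (pvDiv w).length / 2 := by omega
        push_cast [Nat.cast_sub this]
        ring
      rw [hc, PySem.List.pyGetD_natCast, List.getD_eq_getElem _ _ (by omega)]
    rw [hget, hget2]
    have hlt2 : (pvDiv w)[(pvDiv w).length / 2 - 1]'(by omega) <
        (pvDiv w)[(pvDiv w).length / 2]'(by omega) := pvDiv_getElem_lt (by omega) (by omega)
    rw [PySem.List.sorted_rev_eq_of_perm_of_pairwise_gt _
        [(pvDiv w)[(pvDiv w).length / 2]'(by omega), (pvDiv w)[(pvDiv w).length / 2 - 1]'(by omega)] _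
        (List.Perm.swap _ _ _) (by simpa using hlt2)]
    have e1 : (pvDiv w)[(pvDiv w).length / 2]'(by omega) =
        (pvDiv w)[(pvDiv w).length - 1 - ((pvDiv w).length - 1) / 2]'(by omega) :=
      pv_getElem_congr (by omega) (by omega)
    have e2 : (pvDiv w)[(pvDiv w).length / 2 - 1]'(by omega) =
        (pvDiv w)[((pvDiv w).length - 1) / 2]'hm :=
      pv_getElem_congr (by omega) (by omega)
    simp [e1, e2]

theorem pv_final (brown yellow : Int) (hw : 1 ≤ brown + yellow) :
    solution brown yellow = solution_alt brown yellow := by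
  show (let width := brown + yellow;
    let divisor := (PySem.List.pyRange 1 (width + 1) 1).foldl
        (fun acc i => if PySem.Int.mod width i == 0 then acc ++ [i] else acc) [];
    let num : Int := divisor.length;
    if PySem.Int.mod num 2 == 1 then
      PySem.List.sorted [PySem.List.pyGetD divisor (PySem.Int.floordiv num 2) 0,
                         PySem.List.pyGetD divisor (PySem.Int.floordiv num 2) 0] (fun x => x) true
    else
      PySem.List.sorted [PySem.List.pyGetD divisor (PySem.Int.floordiv num 2 - 1) 0,
                         PySem.List.pyGetD divisor (PySem.Int.floordiv num 2) 0] (fun x => x) true) = _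
  simp only [PySem.List.foldl_append_if_eq_filter, List.nil_append]
  exact pv_core hw

-- ===== VERDICT (by name: the statement is the Claim_ definition above) =====
theorem solution_spec : Claim_equal_solution := by
  intro brown yellow _ hpre
  exact pv_final brown yellow hpre
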